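-- pv_equiv track=rewrite | github.com/SaferPlaces2023/saferplaces-multiagent | src/saferplaces_multiagent/ma/specialized/tools/digital_twin_tool.py | _layers_list_to_dict
-- ===== SOURCE A (Python) =====
-- from typing import Any, ClassVar, Dict, List, Literal, Optional
--
-- LAYER_CATEGORIES = {
--     "elevation": ["dem", "valleydepth", "tri", "tpi"],
--     "hydrology": ["slope", "dem_filled", "flow_dir", "flow_accum", "streams", "hand", "twi", "river_network", "river_distance"],
--     "constructions": ["buildings", "dem_buildings", "dem_filled_buildings", "roads"],
--     "landcover": ["landuse", "manning", "ndvi", "ndwi", "ndbi", "sea_mask"],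
--     "soil": ["sand", "clay"],
-- }
--
-- def _layers_list_to_dict(layers: List[str]) -> Dict[str, List[str]]:
--     """Convert a flat list of layer names to the nested category dict expected by the API."""
--     result: Dict[str, List[str]] = {}
--     for layer in layers:
--         for category, category_layers in LAYER_CATEGORIES.items():
--             if layer in category_layers:
--                 result.setdefault(category, []).append(layer)
--                 break
--     return result
-- ===== SOURCE B (Python) =====
-- from typing import Dict, List
--
-- LAYER_CATEGORIES = {
--     "elevation": ["dem", "valleydepth", "tri", "tpi"],
--     "hydrology": ["slope", "dem_filled", "flow_dir", "flow_accum", "streams", "hand", "twi", "river_network", "river_distance"],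
--     "constructions": ["buildings", "dem_buildings", "dem_filled_buildings", "roads"],
--     "landcover": ["landuse", "manning", "ndvi", "ndwi", "ndbi", "sea_mask"],
--     "soil": ["sand", "clay"],
-- }
--
-- _LAYER_INDEX: Dict[str, str] = {
--     name: category
--     for category, names in LAYER_CATEGORIES.items()
--     for name in names
-- }
--
-- def _layers_list_to_dict(layers: List[str]) -> Dict[str, List[str]]:
--     """Convert a flat list of layer names to the nested category dict expected by the API."""
--     result: Dict[str, List[str]] = {}
--     for layer in layers:
--         category = _LAYER_INDEX.get(layer)
--         if category is not None:
--             result.setdefault(category, []).append(layer)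
--     return result
-- ===== Notes on version B (the rewrite author's own statement) =====
-- stated objective: faster
-- what changed: Replaced the inner per-layer scan over all category lists with a reverse name->category index dict built once, then a single lookup-and-append pass over the input.
import Mathlib
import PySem

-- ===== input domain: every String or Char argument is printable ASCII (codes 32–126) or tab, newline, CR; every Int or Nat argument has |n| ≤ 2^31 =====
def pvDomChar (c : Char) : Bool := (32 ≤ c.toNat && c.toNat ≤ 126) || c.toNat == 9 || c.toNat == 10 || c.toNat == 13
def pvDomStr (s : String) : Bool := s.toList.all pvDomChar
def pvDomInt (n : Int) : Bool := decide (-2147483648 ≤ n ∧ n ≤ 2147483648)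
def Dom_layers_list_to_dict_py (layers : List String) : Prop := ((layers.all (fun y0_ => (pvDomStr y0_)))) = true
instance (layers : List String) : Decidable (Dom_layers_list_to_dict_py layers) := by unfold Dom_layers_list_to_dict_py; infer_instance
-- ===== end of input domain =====

-- B replaces A's inner scan over all category lists by a reverse name->category index built once, then a single lookup pass (idiomatic).

-- ===== PORT A =====
def pvLayerCategories : List (String × List String) :=
  [("elevation", ["dem", "valleydepth", "tri", "tpi"]),
   ("hydrology", ["slope", "dem_filled", "flow_dir", "flow_accum", "streams", "hand", "twi", "river_network", "river_distance"]),
   ("constructions", ["buildings", "dem_buildings", "dem_filled_buildings", "roads"]),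
   ("landcover", ["landuse", "manning", "ndvi", "ndwi", "ndbi", "sea_mask"]),
   ("soil", ["sand", "clay"])]

-- inner 'for category, category_layers in LAYER_CATEGORIES.items(): … break' loop of A
def pvInnerA (result : PySem.Dict String (List String)) (layer : String) :
    List (String × List String) → PySem.Dict String (List String)
  | [] => result
  | (cat, cls) :: rest =>
      if cls.contains layer then result.modify cat [] (· ++ [layer])
      else pvInnerA result layer rest

def layers_list_to_dict_py (layers : List String) : List (String × List String) :=
  (layers.foldl (fun result layer => pvInnerA result layer pvLayerCategories) PySem.Dict.empty).items

-- ===== PORT B =====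
-- reverse index {name: category}, built once by the dict comprehension in Source B
def pvLayerIndex : PySem.Dict String String :=
  pvLayerCategories.foldl
    (fun d p => p.2.foldl (fun d name => d.insert name p.1) d)
    PySem.Dict.empty

def layers_list_to_dict_py_alt (layers : List String) : List (String × List String) :=
  (layers.foldl
    (fun result layer =>
      match pvLayerIndex.get? layer with
      | some category => result.modify category [] (· ++ [layer])
      | none => result)
    PySem.Dict.empty).items

-- ===== PRECONDITION & SPEC =====
def Spec_layers_list_to_dict_py (layers : List String) (out : List (String × List String)) : Prop := out = layers_list_to_dict_py_alt layers
instance (layers : List String) (out : List (String × List String)) : Decidable (Spec_layers_list_to_dict_py layers out) := by unfold Spec_layers_list_to_dict_py; infer_instance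

-- ===== CLAIM (what is proved, stated in full; the proofs are below) =====
def Claim_equal_layers_list_to_dict_py : Prop := ∀ (layers : List String), Dom_layers_list_to_dict_py layers → Spec_layers_list_to_dict_py layers (layers_list_to_dict_py layers)

-- ===== LEMMAS AND PROOFS =====

-- per-element step agreement: A's inner scan and B's index lookup update the dict identically
set_option maxRecDepth 100000 in
set_option maxHeartbeats 1000000 in
theorem pv_step_eq (result : PySem.Dict String (List String)) (layer : String) :
    pvInnerA result layer pvLayerCategories =
      (match pvLayerIndex.get? layer with
       | some category => result.modify category [] (· ++ [layer])
       | none => result) := by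
  by_cases h1 : layer ∈ ["dem", "valleydepth", "tri", "tpi"]
  · simp only [List.mem_cons, List.not_mem_nil, or_false] at h1
    rcases h1 with rfl | rfl | rfl | rfl <;> rfl
  by_cases h2 : layer ∈ ["slope", "dem_filled", "flow_dir", "flow_accum", "streams", "hand", "twi", "river_network", "river_distance"]
  · simp only [List.mem_cons, List.not_mem_nil, or_false] at h2
    rcases h2 with rfl | rfl | rfl | rfl | rfl | rfl | rfl | rfl | rfl <;> rfl
  by_cases h3 : layer ∈ ["buildings", "dem_buildings", "dem_filled_buildings", "roads"]
  · simp only [List.mem_cons, List.not_mem_nil, or_false] at h3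
    rcases h3 with rfl | rfl | rfl | rfl <;> rfl
  by_cases h4 : layer ∈ ["landuse", "manning", "ndvi", "ndwi", "ndbi", "sea_mask"]
  · simp only [List.mem_cons, List.not_mem_nil, or_false] at h4
    rcases h4 with rfl | rfl | rfl | rfl | rfl | rfl <;> rfl
  by_cases h5 : layer ∈ ["sand", "clay"]
  · simp only [List.mem_cons, List.not_mem_nil, or_false] at h5
    rcases h5 with rfl | rfl <;> rfl
  · have hidx : pvLayerIndex = PySem.Dict.mk [("dem", "elevation"), ("valleydepth", "elevation"), ("tri", "elevation"), ("tpi", "elevation"), ("slope", "hydrology"), ("dem_filled", "hydrology"), ("flow_dir", "hydrology"), ("flow_accum", "hydrology"), ("streams", "hydrology"), ("hand", "hydrology"), ("twi", "hydrology"), ("river_network", "hydrology"), ("river_distance", "hydrology"), ("buildings", "constructions"), ("dem_buildings", "constructions"), ("dem_filled_buildings", "constructions"), ("roads", "constructions"), ("landuse", "landcover"), ("manning", "landcover"), ("ndvi", "landcover"), ("ndwi", "landcover"), ("ndbi", "landcover"), ("sea_mask", "landcover"), ("sand", "soil"), ("clay", "soil")] := by rfl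
    have g1 := h1
    have g2 := h2
    have g3 := h3
    have g4 := h4
    have g5 := h5
    simp only [List.mem_cons, List.not_mem_nil, or_false, not_or] at h1 h2 h3 h4 h5
    obtain ⟨n0, n1, n2, n3⟩ := h1
    obtain ⟨n4, n5, n6, n7, n8, n9, n10, n11, n12⟩ := h2
    obtain ⟨n13, n14, n15, n16⟩ := h3
    obtain ⟨n17, n18, n19, n20, n21, n22⟩ := h4
    obtain ⟨n23, n24⟩ := h5
    have hget : pvLayerIndex.get? layer = none := by
      rw [hidx]
      simp only [PySem.Dict.get?_mk_cons, beq_iff_eq]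
      rw [if_neg (Ne.symm n0)]
      rw [if_neg (Ne.symm n1)]
      rw [if_neg (Ne.symm n2)]
      rw [if_neg (Ne.symm n3)]
      rw [if_neg (Ne.symm n4)]
      rw [if_neg (Ne.symm n5)]
      rw [if_neg (Ne.symm n6)]
      rw [if_neg (Ne.symm n7)]
      rw [if_neg (Ne.symm n8)]
      rw [if_neg (Ne.symm n9)]
      rw [if_neg (Ne.symm n10)]
      rw [if_neg (Ne.symm n11)]
      rw [if_neg (Ne.symm n12)]
      rw [if_neg (Ne.symm n13)]
      rw [if_neg (Ne.symm n14)]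
      rw [if_neg (Ne.symm n15)]
      rw [if_neg (Ne.symm n16)]
      rw [if_neg (Ne.symm n17)]
      rw [if_neg (Ne.symm n18)]
      rw [if_neg (Ne.symm n19)]
      rw [if_neg (Ne.symm n20)]
      rw [if_neg (Ne.symm n21)]
      rw [if_neg (Ne.symm n22)]
      rw [if_neg (Ne.symm n23)]
      rw [if_neg (Ne.symm n24)]
      rfl
    rw [hget]
    simp only [pvInnerA, pvLayerCategories, List.contains_eq_mem]
    rw [if_neg (by simpa using g1), if_neg (by simpa using g2), if_neg (by simpa using g3), if_neg (by simpa using g4), if_neg (by simpa using g5)]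

-- ===== VERDICT (by name: the statement is the Claim_ definition above) =====
theorem layers_list_to_dict_py_spec : Claim_equal_layers_list_to_dict_py := by
  intro layers _
  unfold Spec_layers_list_to_dict_py layers_list_to_dict_py layers_list_to_dict_py_alt
  have hfun : (fun (result : PySem.Dict String (List String)) (layer : String) =>
      pvInnerA result layer pvLayerCategories) =
      (fun (result : PySem.Dict String (List String)) (layer : String) =>
        match pvLayerIndex.get? layer with
        | some category => result.modify category [] (· ++ [layer])
        | none => result) := by
    funext r l
    exact pv_step_eq r l
  rw [hfun]
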